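-- pv_equiv track=rewrite | github.com/romeo111/OpenOnco | scripts/gen_nakaz_dod4.py | classify_test
-- ===== SOURCE A (Python) =====
-- CLINICAL_TEST_IDS = {
--     "TEST-CBC", "TEST-CMP", "TEST-LFT", "TEST-LDH", "TEST-URIC-ACID",
--     "TEST-COAG-PANEL", "TEST-RENAL-FUNCTION-EGFR", "TEST-B2-MICROGLOBULIN",
--     "TEST-PSA", "TEST-D-DIMER", "TEST-PERIPHERAL-SMEAR", "TEST-PREGNANCY",
--     "TEST-CHILD-PUGH", "TEST-MELD", "TEST-FERRITIN", "TEST-B12-FOLATE",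
--     "TEST-AFP-SERUM", "TEST-CEA", "TEST-CA125", "TEST-BCR-ABL-JAK2",
-- }
--
-- SEROLOGY_TEST_PREFIXES = (
--     "TEST-HBV", "TEST-HCV", "TEST-HIV", "TEST-CMV", "TEST-HTLV",
--     "TEST-EBV", "TEST-H-PYLORI",
-- )
--
-- IHC_TEST_PREFIXES = (
--     "TEST-IHC-", "TEST-FLOW-CYTOMETRY", "TEST-BM-ASPIRATE", "TEST-BM-TREPHINE",
--     "TEST-BIOPSY-", "TEST-CYTOLOGY-",
-- )
--
-- IHC_TEST_IDS = {
--     "TEST-FLOW-CYTOMETRY", "TEST-BM-ASPIRATE", "TEST-BM-TREPHINE",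
--     "TEST-CD20-IHC", "TEST-BRONCHOSCOPY-WITH-EBUS",
-- }
--
-- MOLECULAR_TEST_PREFIXES = (
--     "TEST-NGS-", "TEST-FISH-", "TEST-PCR-", "TEST-KARYOTYPE",
--     "TEST-MSI-", "TEST-TMB", "TEST-BRAF-V600E",
-- )
--
-- MOLECULAR_TEST_IDS = {
--     "TEST-KARYOTYPE", "TEST-TMB", "TEST-BRAF-V600E", "TEST-BCR-ABL-JAK2",
--     "TEST-FISH-PANEL",
-- }
--
-- IMAGING_TEST_PREFIXES = (
--     "TEST-CT-", "TEST-PET-CT", "TEST-MRI-", "TEST-CECT-",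
--     "TEST-BRAIN-MRI-", "TEST-BREAST-MRI", "TEST-BREAST-US",
-- )
--
-- IMAGING_TEST_IDS = {
--     "TEST-PET-CT", "TEST-BONE-SCAN", "TEST-ECHO", "TEST-ECG",
--     "TEST-BREAST-MRI", "TEST-BREAST-US", "TEST-CECT-CAP",
-- }
--
-- def classify_test(test_id: str) -> str:
--     """Return one of: clinical, serology, ihc, molecular, imaging, other."""
--     tid = test_id.upper()
--     if tid in CLINICAL_TEST_IDS:
--         return "clinical"
--     if any(tid.startswith(p.upper()) for p in SEROLOGY_TEST_PREFIXES):
--         return "serology"  # folded into clinical in table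
--     if tid in IHC_TEST_IDS or any(tid.startswith(p.upper()) for p in IHC_TEST_PREFIXES):
--         return "ihc"
--     if tid in MOLECULAR_TEST_IDS or any(tid.startswith(p.upper()) for p in MOLECULAR_TEST_PREFIXES):
--         return "molecular"
--     if tid in IMAGING_TEST_IDS or any(tid.startswith(p.upper()) for p in IMAGING_TEST_PREFIXES):
--         return "imaging"
--     return "other"
-- ===== SOURCE B (Python) =====
-- # Aggregation instead of sequential branching: one merged id->rank dict (earliest
-- # category wins) plus a flat ranked prefix list; the answer is the category of
-- # MINIMAL rank among all matches, computed in a single min-fold, not a first-match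
-- # if-chain.
-- _CATS = ("clinical", "serology", "ihc", "molecular", "imaging", "other")
--
-- _ID_GROUPS = (
--     ("TEST-CBC", "TEST-CMP", "TEST-LFT", "TEST-LDH", "TEST-URIC-ACID",
--      "TEST-COAG-PANEL", "TEST-RENAL-FUNCTION-EGFR", "TEST-B2-MICROGLOBULIN",
--      "TEST-PSA", "TEST-D-DIMER", "TEST-PERIPHERAL-SMEAR", "TEST-PREGNANCY",
--      "TEST-CHILD-PUGH", "TEST-MELD", "TEST-FERRITIN", "TEST-B12-FOLATE",
--      "TEST-AFP-SERUM", "TEST-CEA", "TEST-CA125", "TEST-BCR-ABL-JAK2"),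
--     (),
--     ("TEST-FLOW-CYTOMETRY", "TEST-BM-ASPIRATE", "TEST-BM-TREPHINE",
--      "TEST-CD20-IHC", "TEST-BRONCHOSCOPY-WITH-EBUS"),
--     ("TEST-KARYOTYPE", "TEST-TMB", "TEST-BRAF-V600E", "TEST-BCR-ABL-JAK2",
--      "TEST-FISH-PANEL"),
--     ("TEST-PET-CT", "TEST-BONE-SCAN", "TEST-ECHO", "TEST-ECG",
--      "TEST-BREAST-MRI", "TEST-BREAST-US", "TEST-CECT-CAP"),
-- )
--
-- _PREFIX_GROUPS = (
--     (),
--     ("TEST-HBV", "TEST-HCV", "TEST-HIV", "TEST-CMV", "TEST-HTLV",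
--      "TEST-EBV", "TEST-H-PYLORI"),
--     ("TEST-IHC-", "TEST-FLOW-CYTOMETRY", "TEST-BM-ASPIRATE", "TEST-BM-TREPHINE",
--      "TEST-BIOPSY-", "TEST-CYTOLOGY-"),
--     ("TEST-NGS-", "TEST-FISH-", "TEST-PCR-", "TEST-KARYOTYPE",
--      "TEST-MSI-", "TEST-TMB", "TEST-BRAF-V600E"),
--     ("TEST-CT-", "TEST-PET-CT", "TEST-MRI-", "TEST-CECT-",
--      "TEST-BRAIN-MRI-", "TEST-BREAST-MRI", "TEST-BREAST-US"),
-- )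
--
-- _ID_RANK = {}
-- for _r, _ids in enumerate(_ID_GROUPS):
--     for _t in _ids:
--         _ID_RANK.setdefault(_t, _r)
--
-- _PREFIX_RANKED = [(p, r) for r, ps in enumerate(_PREFIX_GROUPS) for p in ps]
--
--
-- def classify_test(test_id: str) -> str:
--     """Return one of: clinical, serology, ihc, molecular, imaging, other."""
--     tid = test_id.upper()
--     best = _ID_RANK.get(tid, 5)
--     for p, r in _PREFIX_RANKED:
--         if tid.startswith(p):
--             best = min(best, r)
--     return _CATS[best]
-- ===== Notes on version B (the rewrite author's own statement) =====
-- stated objective: alternative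
-- what changed: Replaces A's first-match chain of five set/prefix branches by a rank aggregation: a single merged id->rank dict (earliest category wins) and one flat (prefix, rank) list, the result being the category of minimal rank among all matches computed by a min-fold.
import Mathlib
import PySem

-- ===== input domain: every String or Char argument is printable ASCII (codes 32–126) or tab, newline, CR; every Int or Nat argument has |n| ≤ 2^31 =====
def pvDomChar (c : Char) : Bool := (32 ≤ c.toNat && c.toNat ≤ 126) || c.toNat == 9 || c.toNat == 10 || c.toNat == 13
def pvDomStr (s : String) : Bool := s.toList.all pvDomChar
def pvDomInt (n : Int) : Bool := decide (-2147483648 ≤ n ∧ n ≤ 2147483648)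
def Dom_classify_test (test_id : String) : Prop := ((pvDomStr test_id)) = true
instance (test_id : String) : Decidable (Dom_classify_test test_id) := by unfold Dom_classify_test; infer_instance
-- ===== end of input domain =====

-- B replaces A's first-match chain of five set/prefix branches by a rank aggregation
-- (merged id->rank dict + flat ranked prefix list, min-fold); objective: alternative.

-- ===== PORT A =====
def CLINICAL_TEST_IDS : PySem.Set String := PySem.Set.ofList
  ["TEST-CBC", "TEST-CMP", "TEST-LFT", "TEST-LDH", "TEST-URIC-ACID",
   "TEST-COAG-PANEL", "TEST-RENAL-FUNCTION-EGFR", "TEST-B2-MICROGLOBULIN",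
   "TEST-PSA", "TEST-D-DIMER", "TEST-PERIPHERAL-SMEAR", "TEST-PREGNANCY",
   "TEST-CHILD-PUGH", "TEST-MELD", "TEST-FERRITIN", "TEST-B12-FOLATE",
   "TEST-AFP-SERUM", "TEST-CEA", "TEST-CA125", "TEST-BCR-ABL-JAK2"]

def SEROLOGY_TEST_PREFIXES : List String :=
  ["TEST-HBV", "TEST-HCV", "TEST-HIV", "TEST-CMV", "TEST-HTLV",
   "TEST-EBV", "TEST-H-PYLORI"]

def IHC_TEST_PREFIXES : List String :=
  ["TEST-IHC-", "TEST-FLOW-CYTOMETRY", "TEST-BM-ASPIRATE", "TEST-BM-TREPHINE",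
   "TEST-BIOPSY-", "TEST-CYTOLOGY-"]

def IHC_TEST_IDS : PySem.Set String := PySem.Set.ofList
  ["TEST-FLOW-CYTOMETRY", "TEST-BM-ASPIRATE", "TEST-BM-TREPHINE",
   "TEST-CD20-IHC", "TEST-BRONCHOSCOPY-WITH-EBUS"]

def MOLECULAR_TEST_PREFIXES : List String :=
  ["TEST-NGS-", "TEST-FISH-", "TEST-PCR-", "TEST-KARYOTYPE",
   "TEST-MSI-", "TEST-TMB", "TEST-BRAF-V600E"]

def MOLECULAR_TEST_IDS : PySem.Set String := PySem.Set.ofList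
  ["TEST-KARYOTYPE", "TEST-TMB", "TEST-BRAF-V600E", "TEST-BCR-ABL-JAK2",
   "TEST-FISH-PANEL"]

def IMAGING_TEST_PREFIXES : List String :=
  ["TEST-CT-", "TEST-PET-CT", "TEST-MRI-", "TEST-CECT-",
   "TEST-BRAIN-MRI-", "TEST-BREAST-MRI", "TEST-BREAST-US"]

def IMAGING_TEST_IDS : PySem.Set String := PySem.Set.ofList
  ["TEST-PET-CT", "TEST-BONE-SCAN", "TEST-ECHO", "TEST-ECG",
   "TEST-BREAST-MRI", "TEST-BREAST-US", "TEST-CECT-CAP"]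

def classify_test (test_id : String) : String :=
  let tid := PySem.Str.upper test_id
  if PySem.Set.contains CLINICAL_TEST_IDS tid then "clinical"
  else if SEROLOGY_TEST_PREFIXES.any (fun p => PySem.Str.startswith tid (PySem.Str.upper p)) then "serology"
  else if PySem.Set.contains IHC_TEST_IDS tid || IHC_TEST_PREFIXES.any (fun p => PySem.Str.startswith tid (PySem.Str.upper p)) then "ihc"
  else if PySem.Set.contains MOLECULAR_TEST_IDS tid || MOLECULAR_TEST_PREFIXES.any (fun p => PySem.Str.startswith tid (PySem.Str.upper p)) then "molecular"
  else if PySem.Set.contains IMAGING_TEST_IDS tid || IMAGING_TEST_PREFIXES.any (fun p => PySem.Str.startswith tid (PySem.Str.upper p)) then "imaging"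
  else "other"

-- ===== PORT B =====
-- Source B's module-level data: category names, id groups by rank, prefix groups by rank
def pvCats : List String := ["clinical", "serology", "ihc", "molecular", "imaging", "other"]

def pvIdGroups : List (List String) :=
  [["TEST-CBC", "TEST-CMP", "TEST-LFT", "TEST-LDH", "TEST-URIC-ACID",
    "TEST-COAG-PANEL", "TEST-RENAL-FUNCTION-EGFR", "TEST-B2-MICROGLOBULIN",
    "TEST-PSA", "TEST-D-DIMER", "TEST-PERIPHERAL-SMEAR", "TEST-PREGNANCY",
    "TEST-CHILD-PUGH", "TEST-MELD", "TEST-FERRITIN", "TEST-B12-FOLATE",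
    "TEST-AFP-SERUM", "TEST-CEA", "TEST-CA125", "TEST-BCR-ABL-JAK2"],
   [],
   ["TEST-FLOW-CYTOMETRY", "TEST-BM-ASPIRATE", "TEST-BM-TREPHINE",
    "TEST-CD20-IHC", "TEST-BRONCHOSCOPY-WITH-EBUS"],
   ["TEST-KARYOTYPE", "TEST-TMB", "TEST-BRAF-V600E", "TEST-BCR-ABL-JAK2",
    "TEST-FISH-PANEL"],
   ["TEST-PET-CT", "TEST-BONE-SCAN", "TEST-ECHO", "TEST-ECG",
    "TEST-BREAST-MRI", "TEST-BREAST-US", "TEST-CECT-CAP"]]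

def pvPrefixGroups : List (List String) :=
  [[],
   ["TEST-HBV", "TEST-HCV", "TEST-HIV", "TEST-CMV", "TEST-HTLV",
    "TEST-EBV", "TEST-H-PYLORI"],
   ["TEST-IHC-", "TEST-FLOW-CYTOMETRY", "TEST-BM-ASPIRATE", "TEST-BM-TREPHINE",
    "TEST-BIOPSY-", "TEST-CYTOLOGY-"],
   ["TEST-NGS-", "TEST-FISH-", "TEST-PCR-", "TEST-KARYOTYPE",
    "TEST-MSI-", "TEST-TMB", "TEST-BRAF-V600E"],
   ["TEST-CT-", "TEST-PET-CT", "TEST-MRI-", "TEST-CECT-",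
    "TEST-BRAIN-MRI-", "TEST-BREAST-MRI", "TEST-BREAST-US"]]

-- `for _r, _ids in enumerate(...): for _t in _ids: _ID_RANK.setdefault(_t, _r)`
-- (ranks are Python ints, non-negative by construction; carried as Nat so they index pvCats)
-- enumerate's ranks are non-negative Python ints; carried as Nat (via zipIdx) so they index pvCats
def pvIdRank : PySem.Dict String Nat :=
  pvIdGroups.zipIdx.foldl
    (fun d ri => ri.1.foldl (fun d t => PySem.Dict.setdefault d t ri.2) d)
    PySem.Dict.empty

-- `[(p, r) for r, ps in enumerate(_PREFIX_GROUPS) for p in ps]`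
def pvPrefixRanked : List (String × Nat) :=
  pvPrefixGroups.zipIdx.flatMap (fun ri => ri.1.map (fun p => (p, ri.2)))

def classify_test_alt (test_id : String) : String :=
  let tid := PySem.Str.upper test_id
  let best0 := PySem.Dict.getD pvIdRank tid 5
  let best := pvPrefixRanked.foldl
    (fun best pr => if PySem.Str.startswith tid pr.1 then min best pr.2 else best) best0
  -- best ≤ 5 by construction, so plain List.getD is exact for Python's _CATS[best]
  pvCats.getD best ""

-- ===== PRECONDITION & SPEC =====
def Spec_classify_test (test_id : String) (out : String) : Prop := out = classify_test_alt test_id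
instance (test_id : String) (out : String) : Decidable (Spec_classify_test test_id out) := by unfold Spec_classify_test; infer_instance

-- ===== CLAIM (what is proved, stated in full; the proofs are below) =====
def Claim_equal_classify_test : Prop := ∀ (test_id : String), Dom_classify_test test_id → Spec_classify_test test_id (classify_test test_id)

-- ===== LEMMAS AND PROOFS =====
-- A's prefix constants are already upper-case, so p.upper() is the identity on them
theorem upper_serology : ∀ p ∈ SEROLOGY_TEST_PREFIXES, PySem.Str.upper p = p := by decide
theorem upper_ihc : ∀ p ∈ IHC_TEST_PREFIXES, PySem.Str.upper p = p := by decide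
theorem upper_molecular : ∀ p ∈ MOLECULAR_TEST_PREFIXES, PySem.Str.upper p = p := by decide
theorem upper_imaging : ∀ p ∈ IMAGING_TEST_PREFIXES, PySem.Str.upper p = p := by decide

theorem any_upper_eq {ps : List String} (h : ∀ p ∈ ps, PySem.Str.upper p = p) (tid : String) :
    ps.any (fun p => PySem.Str.startswith tid (PySem.Str.upper p))
      = ps.any (fun p => PySem.Str.startswith tid p) := by
  induction ps with
  | nil => rfl
  | cons a l ih =>
    simp only [List.any_cons, h a (List.mem_cons_self), ih (fun p hp => h p (List.mem_cons_of_mem a hp))]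

-- the merged rank dict, written out as the concatenation its construction produces
-- (TEST-BCR-ABL-JAK2 kept by setdefault at rank 0, skipped at rank 3)
theorem pvIdRank_eq : pvIdRank = PySem.Dict.mk
    (CLINICAL_TEST_IDS.map (fun k => (k, 0))
      ++ (IHC_TEST_IDS.map (fun k => (k, 2))
      ++ ((["TEST-KARYOTYPE", "TEST-TMB", "TEST-BRAF-V600E", "TEST-FISH-PANEL"] : List String).map (fun k => (k, 3))
      ++ (IMAGING_TEST_IDS.map (fun k => (k, 4)) ++ [])))) := by
  set_option maxRecDepth 8192 in decide

-- lookup in a constant-value block followed by the rest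
theorem getD_block (keys : List String) (r d : Nat) (rest : List (String × Nat)) (tid : String) :
    (PySem.Dict.mk (keys.map (fun k => (k, r)) ++ rest)).getD tid d
      = if keys.contains tid then r else (PySem.Dict.mk rest).getD tid d := by
  induction keys with
  | nil => simp
  | cons a l ih =>
    rw [List.map_cons, List.cons_append, PySem.Dict.getD_eq_get?_getD, PySem.Dict.get?_mk_cons]
    by_cases h : a = tid
    · subst h; simp
    · have hb : (a == tid) = false := beq_false_of_ne h
      rw [hb]
      simp only [Bool.false_eq_true, if_false, ← PySem.Dict.getD_eq_get?_getD, ih]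
      by_cases hm : l.contains tid = true <;> simp [Ne.symm h]

-- the min-fold over a constant-rank prefix block followed by the rest
theorem foldl_block (tid : String) (ps : List String) (r : Nat) (rest : List (String × Nat)) (b : Nat) :
    List.foldl (fun best pr => if PySem.Str.startswith tid pr.1 then min best pr.2 else best) b
        (ps.map (fun p => (p, r)) ++ rest)
      = List.foldl (fun best pr => if PySem.Str.startswith tid pr.1 then min best pr.2 else best)
          (if ps.any (fun p => PySem.Str.startswith tid p) then min b r else b) rest := by
  induction ps generalizing b with
  | nil => simp
  | cons a l ih =>
    simp only [List.map_cons, List.cons_append, List.foldl_cons]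
    rw [ih]
    congr 1
    by_cases ha : PySem.Str.startswith tid a = true <;>
      by_cases hl : (l.any fun p => PySem.Str.startswith tid p) = true <;>
        simp only [List.any_cons, ha, hl, Bool.true_or, Bool.false_or, Bool.or_false,
          Bool.false_eq_true, if_true, if_false, Nat.min_assoc, Nat.min_self]

-- the two sides as pure Boolean tables, compared by decide (512 cases)
def pvB0 (c hi m g : Bool) : Nat :=
  if c = true then 0 else if hi = true then 2 else if m = true then 3 else if g = true then 4 else 5
def pvB1 (c s hi m g : Bool) : Nat :=
  if s = true then min (pvB0 c hi m g) 1 else pvB0 c hi m g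
def pvB2 (c s hi pi m g : Bool) : Nat :=
  if pi = true then min (pvB1 c s hi m g) 2 else pvB1 c s hi m g
def pvB3 (c s hi pi m pm g : Bool) : Nat :=
  if pm = true then min (pvB2 c s hi pi m g) 3 else pvB2 c s hi pi m g
def pvB4 (c s hi pi m pm g pg : Bool) : Nat :=
  if pg = true then min (pvB3 c s hi pi m pm g) 4 else pvB3 c s hi pi m pm g

theorem rank_case (c s hi pi m pm g pg j : Bool) :
    (if c = true then "clinical"
     else if s = true then "serology"
     else if (hi || pi) = true then "ihc"
     else if (m || c && j || pm) = true then "molecular"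
     else if (g || pg) = true then "imaging"
     else "other")
      = pvCats.getD (pvB4 c s hi pi m pm g pg) "" := by
  revert c s hi pi m pm g pg j
  decide

-- ===== VERDICT (by name: the statement is the Claim_ definition above) =====
theorem classify_test_spec : Claim_equal_classify_test := by
  intro test_id _
  unfold Spec_classify_test classify_test classify_test_alt
  simp only [any_upper_eq upper_serology, any_upper_eq upper_ihc,
    any_upper_eq upper_molecular, any_upper_eq upper_imaging]
  generalize PySem.Str.upper test_id = tid
  have hrank : PySem.Dict.getD pvIdRank tid 5
      = (if CLINICAL_TEST_IDS.contains tid then 0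
         else if IHC_TEST_IDS.contains tid then 2
         else if (["TEST-KARYOTYPE", "TEST-TMB", "TEST-BRAF-V600E", "TEST-FISH-PANEL"] : List String).contains tid then 3
         else if IMAGING_TEST_IDS.contains tid then 4 else 5) := by
    rw [pvIdRank_eq, getD_block, getD_block, getD_block, getD_block]
    simp [PySem.Dict.getD, PySem.Dict.get?]
  have hmol : List.contains MOLECULAR_TEST_IDS tid
      = (List.contains (["TEST-KARYOTYPE", "TEST-TMB", "TEST-BRAF-V600E", "TEST-FISH-PANEL"] : List String) tid
         || List.contains CLINICAL_TEST_IDS tid && (tid == "TEST-BCR-ABL-JAK2")) := by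
    by_cases h : tid = "TEST-BCR-ABL-JAK2" <;>
      simp [MOLECULAR_TEST_IDS, CLINICAL_TEST_IDS, PySem.Set.ofList, h, List.contains_eq_mem]
  have hflat : pvPrefixRanked =
      SEROLOGY_TEST_PREFIXES.map (fun p => (p, 1))
        ++ (IHC_TEST_PREFIXES.map (fun p => (p, 2))
        ++ (MOLECULAR_TEST_PREFIXES.map (fun p => (p, 3))
        ++ (IMAGING_TEST_PREFIXES.map (fun p => (p, 4)) ++ []))) := by decide
  rw [hrank, hflat, foldl_block, foldl_block, foldl_block, foldl_block]
  simp only [PySem.Set.contains_eq_listContains, hmol, List.foldl_nil]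
  exact rank_case (List.contains CLINICAL_TEST_IDS tid)
    (SEROLOGY_TEST_PREFIXES.any (fun p => PySem.Str.startswith tid p))
    (List.contains IHC_TEST_IDS tid)
    (IHC_TEST_PREFIXES.any (fun p => PySem.Str.startswith tid p))
    (List.contains (["TEST-KARYOTYPE", "TEST-TMB", "TEST-BRAF-V600E", "TEST-FISH-PANEL"] : List String) tid)
    (MOLECULAR_TEST_PREFIXES.any (fun p => PySem.Str.startswith tid p))
    (List.contains IMAGING_TEST_IDS tid)
    (IMAGING_TEST_PREFIXES.any (fun p => PySem.Str.startswith tid p))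
    (tid == "TEST-BCR-ABL-JAK2")
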